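-- pv_equiv track=rewrite | github.com/vsipchenko/universium | core/management/commands/import_raw_data.py | _gen_chunks
-- ===== SOURCE A (Python) =====
-- def _gen_chunks(reader, chunksize=1000, max_items=None):
--     chunk = []
--     for idx, line in enumerate(reader):
--         if max_items and idx == max_items:
--             break
--         if idx % chunksize == 0 and idx > 0:
--             yield chunk
--             chunk = []
--         chunk.append(line)
--     yield chunk
-- ===== SOURCE B (Python) =====
-- from itertools import islice
--
--
-- def _gen_chunks(reader, chunksize=1000, max_items=None):
--     it = iter(reader)
--     if max_items is not None and max_items > 0:
--         it = islice(it, max_items)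
--     first = True
--     while True:
--         chunk = list(islice(it, chunksize))
--         if chunk or first:
--             yield chunk
--         if len(chunk) < chunksize:
--             break
--         first = False
-- ===== Notes on version B (the rewrite author's own statement) =====
-- stated objective: idiomatic
-- what changed: B consumes the source in blocks with itertools.islice (wrapping the iterator in islice(it, max_items) for a positive limit) instead of A's per-element enumerate loop with a modulo test; a first-iteration flag yields the single empty chunk on empty input and a short block ends the loop.
-- outside the precondition, e.g. on _gen_chunks(['a', 'b', 'c'], -2, None): A returns [['a', 'b'], ['c']], B raises ValueError; on _gen_chunks([], 0, None): A returns [[]], B does not finish within the time limit; on _gen_chunks(['x'], 0, None): A raises ZeroDivisionError, B does not finish within the time limit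
import Mathlib
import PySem

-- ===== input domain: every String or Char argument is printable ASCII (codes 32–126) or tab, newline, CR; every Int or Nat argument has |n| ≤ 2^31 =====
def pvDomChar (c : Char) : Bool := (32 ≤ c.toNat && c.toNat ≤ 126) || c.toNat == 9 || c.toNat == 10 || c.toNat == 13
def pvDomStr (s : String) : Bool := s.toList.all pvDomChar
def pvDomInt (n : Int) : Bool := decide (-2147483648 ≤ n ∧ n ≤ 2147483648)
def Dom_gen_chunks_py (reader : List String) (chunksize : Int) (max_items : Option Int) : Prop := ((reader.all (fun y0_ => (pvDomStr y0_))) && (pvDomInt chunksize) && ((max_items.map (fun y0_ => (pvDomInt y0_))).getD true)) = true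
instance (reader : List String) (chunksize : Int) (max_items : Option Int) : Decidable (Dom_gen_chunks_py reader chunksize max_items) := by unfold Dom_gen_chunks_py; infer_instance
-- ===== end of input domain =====

-- B consumes the input in islice-style blocks (List.take/drop) instead of A's per-element
-- modulo-counting loop; equivalence is about the returned list of chunks (both are generators).


-- ===== PORT A =====
-- A's loop: enumerate, break when idx == max_items (truthy limit), yield and reset the
-- accumulated chunk when idx % chunksize == 0 and idx > 0, final yield of the open chunk.
def genChunksGoA (chunksize : Int) (max_items : Option Int) :
    List String → Int → List String → List (List String)
  | [], _, chunk => [chunk]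
  | line :: rest, idx, chunk =>
    if (match max_items with | some m => m != 0 && idx == m | none => false) then
      [chunk]
    else if PySem.Int.mod idx chunksize = 0 ∧ 0 < idx then
      chunk :: genChunksGoA chunksize max_items rest (idx + 1) [line]
    else
      genChunksGoA chunksize max_items rest (idx + 1) (chunk ++ [line])

def gen_chunks_py (reader : List String) (chunksize : Int) (max_items : Option Int) : List (List String) :=
  genChunksGoA chunksize max_items reader 0 []

-- ===== PORT B =====
-- B's while-loop: grab a block of `c` items (list(islice(it, chunksize)) = take/drop),
-- yield it if non-empty or on the first round, stop when the block is short.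
-- (`c = 0` is a termination guard: the Python loops forever there, outside Pre_.)
def genChunksGoB (c : Nat) : Bool → List String → List (List String)
  | first, it =>
    let chunk := it.take c
    let ys := if chunk ≠ [] ∨ first = true then [chunk] else []
    if _h1 : (it.take c).length < c then ys
    else if _h2 : c = 0 then ys
    else ys ++ genChunksGoB c false (it.drop c)
termination_by _ it => it.length
decreasing_by
  simp only [List.length_drop]
  have ht : (it.take c).length = min c it.length := List.length_take ..
  omega

def gen_chunks_py_alt (reader : List String) (chunksize : Int) (max_items : Option Int) : List (List String) :=
  let it := match max_items with
    | some m => if 0 < m then reader.take m.toNat else reader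
    | none => reader
  genChunksGoB chunksize.toNat true it

-- ===== PRECONDITION & SPEC =====
-- Pre_ requires chunksize > 0: with chunksize = 0 A raises ZeroDivisionError on any
-- non-empty reader (and B's islice loop never terminates), and a negative chunksize makes
-- A chunk by |chunksize| only as an artefact of Python's floored modulo — a degenerate
-- corner on which B's islice raises ValueError.
def Pre_gen_chunks_py (reader : List String) (chunksize : Int) (max_items : Option Int) : Prop :=
  0 < chunksize
instance (reader : List String) (chunksize : Int) (max_items : Option Int) : Decidable (Pre_gen_chunks_py reader chunksize max_items) := by unfold Pre_gen_chunks_py; infer_instance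

def pvWitness_gen_chunks_py : List String × Int × Option Int := (["a", "b", "c"], 2, some 5)

def Spec_gen_chunks_py (reader : List String) (chunksize : Int) (max_items : Option Int) (out : List (List String)) : Prop := out = gen_chunks_py_alt reader chunksize max_items
instance (reader : List String) (chunksize : Int) (max_items : Option Int) (out : List (List String)) : Decidable (Spec_gen_chunks_py reader chunksize max_items out) := by unfold Spec_gen_chunks_py; infer_instance

-- ===== CLAIM (what is proved, stated in full; the proofs are below) =====
def Claim_equal_gen_chunks_py : Prop := ∀ (reader : List String) (chunksize : Int) (max_items : Option Int), Dom_gen_chunks_py reader chunksize max_items → Pre_gen_chunks_py reader chunksize max_items → Spec_gen_chunks_py reader chunksize max_items (gen_chunks_py reader chunksize max_items)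

-- ===== LEMMAS AND PROOFS =====

-- a positive limit truncates the input: A breaks exactly at global index m
theorem goA_limit_pos (c m : Int) (hm : 0 < m) :
    ∀ (xs : List String) (idx : Int) (hd : List String), 0 ≤ idx → idx ≤ m →
      genChunksGoA c (some m) xs idx hd = genChunksGoA c none (xs.take (m - idx).toNat) idx hd := by
  intro xs
  induction xs with
  | nil => intro idx hd _ _; simp [genChunksGoA]
  | cons x r ih =>
    intro idx hd h0 hle
    by_cases hb : idx = m
    · have ht0 : (m - idx).toNat = 0 := by omega
      simp [genChunksGoA, hb, hm.ne']
    · have ht1 : (m - idx).toNat = (m - (idx + 1)).toNat + 1 := by omega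
      have ih1 := ih (idx + 1) [x] (by omega) (by omega)
      have ih2 := ih (idx + 1) (hd ++ [x]) (by omega) (by omega)
      simp [genChunksGoA, hb, ht1, ih1, ih2]

-- a non-positive limit (0 is falsy, negative never equals idx ≥ 0) is no limit
theorem goA_limit_nonpos (c m : Int) (hm : m ≤ 0) :
    ∀ (xs : List String) (idx : Int) (hd : List String), 0 ≤ idx →
      genChunksGoA c (some m) xs idx hd = genChunksGoA c none xs idx hd := by
  intro xs
  induction xs with
  | nil => intro idx hd _; simp [genChunksGoA]
  | cons x r ih =>
    intro idx hd h0
    have hb : ¬ (m ≠ 0 ∧ idx = m) := by omega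
    have hfalse : (m != 0 && idx == m) = false := by
      rcases eq_or_lt_of_le hm with h | h
      · simp [h]
      · have : idx ≠ m := by omega
        simp [this]
    have ih1 := ih (idx + 1) [x] (by omega)
    have ih2 := ih (idx + 1) (hd ++ [x]) (by omega)
    simp [genChunksGoA, hfalse, ih1, ih2]

-- one unfolding of B's loop when the round's block will be yielded
theorem goB_unfold (n : Nat) (hn : 0 < n) (first : Bool) (ys : List String)
    (h : ys ≠ [] ∨ first = true) :
    genChunksGoB n first ys =
      if ys.length ≤ n then [ys] else ys.take n :: genChunksGoB n false (ys.drop n) := by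
  rw [genChunksGoB]
  by_cases hlt : ys.length < n
  · have htk : ys.take n = ys := List.take_of_length_le (by omega)
    simp [htk, h, if_pos (by omega : ys.length ≤ n), hlt]
  · have hlen : (ys.take n).length = n := by
      have h' : (ys.take n).length = min n ys.length := List.length_take ..
      omega
    by_cases heq : ys.length = n
    · have htk : ys.take n = ys := List.take_of_length_le (by omega)
      have hdrop : ys.drop n = [] := by
        apply List.eq_nil_of_length_eq_zero; simp; omega
      have hnil : genChunksGoB n false ([] : List String) = [] := by
        rw [genChunksGoB]; simp [hn]
      simp [hn.ne', htk, hdrop, hnil, h]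
    · have hne : ys.take n ≠ [] := by
        intro hh; rw [hh] at hlen; simp at hlen; omega
      simp [hlen, hn.ne', hne, if_neg (by omega : ¬ ys.length ≤ n)]

-- one unfolding of B's loop after the first round (ys ≠ [] keeps the yield)
theorem goB_step (n : Nat) (hn : 0 < n) (ys : List String) (hys : ys ≠ []) :
    genChunksGoB n false ys =
      if ys.length ≤ n then [ys] else ys.take n :: genChunksGoB n false (ys.drop n) := by
  exact goB_unfold n hn false ys (Or.inl hys)

-- one unfolding of B's loop on the first round (an empty block is still yielded)
theorem goB_start (n : Nat) (hn : 0 < n) (ys : List String) :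
    genChunksGoB n true ys =
      if ys.length ≤ n then [ys] else ys.take n :: genChunksGoB n false (ys.drop n) := by
  exact goB_unfold n hn true ys (Or.inr rfl)

-- the heart: A's counting loop equals B's block loop, generalized over the open chunk hd
theorem goA_chunks (c : Int) (hc : 0 < c) :
    ∀ (xs hd : List String) (idx : Int),
      hd.length ≤ c.toNat → 0 ≤ idx →
      idx % c = (hd.length : Int) % c →
      (idx = 0 → hd = []) → (0 < idx → hd ≠ []) →
      genChunksGoA c none xs idx hd =
        if xs.length + hd.length ≤ c.toNat then [hd ++ xs]
        else (hd ++ xs.take (c.toNat - hd.length)) ::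
               genChunksGoB c.toNat false (xs.drop (c.toNat - hd.length)) := by
  have hcn : ((c.toNat : Int)) = c := Int.toNat_of_nonneg hc.le
  have hn : 0 < c.toNat := by omega
  intro xs
  induction xs with
  | nil =>
    intro hd idx hlen _ _ _ _
    rw [if_pos (by simpa using hlen)]
    simp [genChunksGoA]
  | cons x r ih =>
    intro hd idx hlen h0 hmod hz hp
    have hmodc : PySem.Int.mod idx c = idx % c := PySem.Int.mod_eq_emod_of_pos hc
    obtain ⟨n', hn'⟩ : ∃ n', c.toNat = n' + 1 := ⟨c.toNat - 1, by omega⟩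
    by_cases hidx : idx = 0
    · -- first element ever: hd = [], no yield
      have hhd : hd = [] := hz hidx
      subst hhd; subst hidx
      have ihx := ih [x] 1 hn (by omega) (by norm_num) (by norm_num) (fun _ => by simp)
      rw [show genChunksGoA c none (x :: r) 0 [] = genChunksGoA c none r 1 [x] by
            simp [genChunksGoA], ihx]
      simp [hn']
    · -- idx > 0, hd ≠ []
      have hpos : 0 < idx := by omega
      have hne : hd ≠ [] := hp hpos
      have hlen1 : 1 ≤ hd.length := by
        cases hd with | nil => exact absurd rfl hne | cons a t => simp
      by_cases hfull : hd.length = c.toNat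
      · -- chunk full: A yields hd and restarts with [x]
        have hmz : idx % c = 0 := by
          rw [hmod, hfull, hcn, Int.emod_self]
        have ihx := ih [x] (idx + 1) hn (by omega)
          (by
            rw [Int.add_emod, hmz]
            simp [Int.emod_emod_of_dvd])
          (by omega) (fun _ => by simp)
        rw [show genChunksGoA c none (x :: r) idx hd
              = hd :: genChunksGoA c none r (idx + 1) [x] by
            simp [genChunksGoA, hmodc, hmz, hpos], ihx]
        have hsub : c.toNat - hd.length = 0 := by omega
        rw [if_neg (show ¬ ((x :: r).length + hd.length ≤ c.toNat) by simp; omega), hsub]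
        simp only [List.take_zero, List.drop_zero, List.append_nil]
        rw [goB_step c.toNat hn (x :: r) (by simp)]
        simp [hn']
      · -- chunk not full: A appends x to hd
        have hlt : hd.length < c.toNat := by omega
        have hmv : idx % c = (hd.length : Int) := by
          rw [hmod, Int.emod_eq_of_lt (by omega) (by omega)]
        have hmnz : ¬ (PySem.Int.mod idx c = 0 ∧ 0 < idx) := by
          rw [hmodc, hmv]; omega
        have ihx := ih (hd ++ [x]) (idx + 1) (by simp; omega) (by omega)
          (by
            rw [Int.add_emod, hmv,
              show ((hd ++ [x]).length : Int) = (hd.length : Int) + 1 by simp,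
              Int.add_emod ((hd.length : Int)) 1 c,
              Int.emod_eq_of_lt (by omega) (show (hd.length : Int) < c by omega)])
          (by omega) (fun _ => by simp)
        rw [show genChunksGoA c none (x :: r) idx hd
              = genChunksGoA c none r (idx + 1) (hd ++ [x]) by
            simp [genChunksGoA, hmnz], ihx]
        obtain ⟨k, hk⟩ : ∃ k, c.toNat - hd.length = k + 1 := ⟨c.toNat - hd.length - 1, by omega⟩
        have hk' : c.toNat - (hd ++ [x]).length = k := by simp; omega
        by_cases hfit : r.length + (hd ++ [x]).length ≤ c.toNat
        · rw [if_pos hfit,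
              if_pos (show (x :: r).length + hd.length ≤ c.toNat by simp at hfit ⊢; omega)]
          simp
        · rw [if_neg hfit,
              if_neg (show ¬ ((x :: r).length + hd.length ≤ c.toNat) by simp at hfit ⊢; omega),
            hk, hk', List.take_succ_cons, List.drop_succ_cons]
          simp

theorem goA_eq_goB (c : Int) (hc : 0 < c) (xs : List String) :
    genChunksGoA c none xs 0 [] = genChunksGoB c.toNat true xs := by
  have hn : 0 < c.toNat := by omega
  rw [goA_chunks c hc xs [] 0 (by simp) le_rfl (by simp) (fun _ => rfl)
    (fun h => absurd h (by norm_num))]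
  rw [goB_start c.toNat hn xs]
  by_cases hfit : xs.length ≤ c.toNat
  · rw [if_pos (by simpa using hfit), if_pos hfit]
    simp
  · rw [if_neg (by simpa using hfit), if_neg hfit]
    simp

-- ===== VERDICT (by name: the statement is the Claim_ definition above) =====
theorem gen_chunks_py_spec : Claim_equal_gen_chunks_py := by
  intro reader chunksize max_items _hdom hpre
  have hc : 0 < chunksize := hpre
  unfold Spec_gen_chunks_py gen_chunks_py gen_chunks_py_alt
  cases max_items with
  | none => exact goA_eq_goB chunksize hc reader
  | some m =>
    by_cases hm : 0 < m
    · simp only [hm, if_pos]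
      rw [goA_limit_pos chunksize m hm reader 0 [] le_rfl (le_of_lt hm)]
      simpa using goA_eq_goB chunksize hc (reader.take (m - 0).toNat)
    · simp only [hm]
      rw [goA_limit_nonpos chunksize m (by omega) reader 0 [] le_rfl]
      exact goA_eq_goB chunksize hc reader
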